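-- pv_equiv track=rewrite | github.com/nestauk/innovation_sweet_spots | innovation_sweet_spots/utils/pd_pos_utils.py | aggregate_matches
-- ===== SOURCE A (Python) =====
-- from collections import defaultdict, Counter
--
-- def aggregate_matches(phrase_dict, sort_phrases = True):
--     """Combines phrase matches over a time period and and counts frequency.
--
--     Args:
--         phrase_dict: A dict with period name as key and list of phrases as values.
--         sort_phrases: If true sorts phrases alphabetically, the default is True.
--
--     Returns:
--         A dict with period name as key and list of (phrase, count) tuples as values.
--     """
--     agg_results = defaultdict(list)
--     for year_period, phrases in phrase_dict.items():
--        flat_results = [elem for sublist in phrases for elem in sublist]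
--        sorted_results = sorted(Counter(flat_results).items())
--        agg_results[year_period] = sorted_results
--     return agg_results
--     return agg_results
-- ===== SOURCE B (Python) =====
-- from collections import defaultdict
-- from itertools import groupby
--
--
-- def aggregate_matches(phrase_dict, sort_phrases=True):
--     """Sort-then-group reimplementation: counts consecutive runs of the
--     sorted flat phrase list instead of hashing into a Counter."""
--     agg_results = defaultdict(list)
--     for year_period, phrases in phrase_dict.items():
--         flat_results = [elem for sublist in phrases for elem in sublist]
--         flat_results.sort()
--         agg_results[year_period] = [
--             (phrase, sum(1 for _ in group))
--             for phrase, group in groupby(flat_results)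
--         ]
--     return agg_results
-- ===== Notes on version B (the rewrite author's own statement) =====
-- stated objective: alternative
-- what changed: Replaces the Counter hash-count plus sort of (phrase,count) pairs by sorting the flat phrase list once and emitting (phrase, run-length) for each consecutive run via itertools.groupby.
import Mathlib
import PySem

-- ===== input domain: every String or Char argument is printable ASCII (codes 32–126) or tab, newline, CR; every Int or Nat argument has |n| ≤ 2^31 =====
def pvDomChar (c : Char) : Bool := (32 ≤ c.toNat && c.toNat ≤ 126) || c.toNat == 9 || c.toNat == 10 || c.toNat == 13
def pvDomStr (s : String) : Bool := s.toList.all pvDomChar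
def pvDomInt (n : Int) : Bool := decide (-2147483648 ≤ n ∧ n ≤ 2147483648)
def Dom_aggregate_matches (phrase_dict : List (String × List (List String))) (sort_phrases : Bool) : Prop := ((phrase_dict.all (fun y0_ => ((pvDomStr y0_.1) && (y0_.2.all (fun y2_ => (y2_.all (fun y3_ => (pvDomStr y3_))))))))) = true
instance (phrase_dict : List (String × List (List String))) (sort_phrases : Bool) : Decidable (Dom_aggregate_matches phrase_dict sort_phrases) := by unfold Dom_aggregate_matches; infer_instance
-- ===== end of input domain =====

-- B replaces A's Counter hash-count (then sort of the (phrase,count) pairs) by sorting the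
-- flat phrase list once and emitting one (phrase, run-length) pair per consecutive run
-- (itertools.groupby); objective: alternative algorithm of similar cost.

-- ===== PORT A =====
def aggregate_matches (phrase_dict : List (String × List (List String))) (sort_phrases : Bool) : List (String × List (String × Int)) :=
  -- agg_results = defaultdict(list); for year_period, phrases in phrase_dict.items(): …
  (phrase_dict.foldl (fun agg_results kv =>
      let flat_results := kv.2.flatMap (fun sublist => sublist)
      let sorted_results := PySem.List.sorted2 (PySem.Dict.counter flat_results).items (fun p => p.1) (fun p => p.2)
      agg_results.insert kv.1 sorted_results)
    (PySem.Dict.empty : PySem.Dict String (List (String × Int)))).items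

-- ===== PORT B =====
-- itertools.groupby over a list: one (key, run length) pair per maximal consecutive run
def groupRuns : List String → List (String × Int)
  | [] => []
  | x :: t =>
    (x, 1 + ((t.takeWhile (fun y => y == x)).length : Int)) ::
      groupRuns (t.dropWhile (fun y => y == x))
termination_by l => l.length
decreasing_by
  exact Nat.lt_succ_of_le (List.Sublist.length_le (List.dropWhile_sublist _))

def aggregate_matches_alt (phrase_dict : List (String × List (List String))) (sort_phrases : Bool) : List (String × List (String × Int)) :=
  (phrase_dict.foldl (fun agg_results kv =>
      let flat_results := kv.2.flatMap (fun sublist => sublist)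
      agg_results.insert kv.1 (groupRuns (PySem.List.sorted flat_results (fun x => x))))
    (PySem.Dict.empty : PySem.Dict String (List (String × Int)))).items

-- ===== PRECONDITION & SPEC =====
def Spec_aggregate_matches (phrase_dict : List (String × List (List String))) (sort_phrases : Bool) (out : List (String × List (String × Int))) : Prop := out = aggregate_matches_alt phrase_dict sort_phrases
instance (phrase_dict : List (String × List (List String))) (sort_phrases : Bool) (out : List (String × List (String × Int))) : Decidable (Spec_aggregate_matches phrase_dict sort_phrases out) := by unfold Spec_aggregate_matches; infer_instance

-- ===== CLAIM (what is proved, stated in full; the proofs are below) =====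
def Claim_equal_aggregate_matches : Prop := ∀ (phrase_dict : List (String × List (List String))) (sort_phrases : Bool), Dom_aggregate_matches phrase_dict sort_phrases → Spec_aggregate_matches phrase_dict sort_phrases (aggregate_matches phrase_dict sort_phrases)

-- ===== LEMMAS AND PROOFS =====

-- insertBy only looks at `before x a` for a in the accumulator
theorem insertBy_congr_mem {α : Type} (b b' : α → α → Bool) (x : α) :
    ∀ (acc : List α), (∀ a ∈ acc, b x a = b' x a) →
      PySem.List.insertBy b x acc = PySem.List.insertBy b' x acc := by
  intro acc
  induction acc with
  | nil => intro _; rfl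
  | cons y ys ih =>
    intro h
    simp only [PySem.List.insertBy]
    rw [h y (by simp)]
    by_cases hb : b' x y = true
    · simp [hb]
    · simp [hb, ih (fun a ha => h a (by simp [ha]))]

theorem foldl_insertBy_congr {α : Type} (b b' : α → α → Bool) :
    ∀ (xs acc : List α), (∀ y ∈ xs, ∀ a, (a ∈ acc ∨ a ∈ xs) → b y a = b' y a) →
      xs.foldl (fun acc x => PySem.List.insertBy b x acc) acc
        = xs.foldl (fun acc x => PySem.List.insertBy b' x acc) acc := by
  intro xs
  induction xs with
  | nil => intro _ _; rfl
  | cons x t ih =>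
    intro acc h
    simp only [List.foldl_cons]
    rw [insertBy_congr_mem b b' x acc (fun a ha => h x (by simp) a (Or.inl ha))]
    apply ih
    intro y hy a ha
    apply h y (by simp [hy])
    rcases ha with ha | ha
    · rcases (PySem.List.mem_insertBy b' x a acc).1 ha with rfl | ha
      · exact Or.inr (by simp)
      · exact Or.inl ha
    · exact Or.inr (by simp [ha])

-- when first components are all distinct, Python's tuple sort is the sort by first component
theorem sorted2_eq_sorted_fst (l : List (String × Int)) (hn : (l.map Prod.fst).Nodup) :
    PySem.List.sorted2 l (fun p => p.1) (fun p => p.2) = PySem.List.sorted l (fun p => p.1) := by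
  rw [PySem.List.sorted_eq_foldl_insertBy]
  show l.foldl (fun acc x => PySem.List.insertBy _ x acc) [] = _
  apply foldl_insertBy_congr
  intro y hy a ha
  rcases ha with ha | ha
  · simp at ha
  by_cases hxy : y = a
  · subst hxy; simp
  · have hfst : y.1 ≠ a.1 := fun hf => hxy (List.inj_on_of_nodup_map hn hy ha hf)
    rcases lt_trichotomy y.1 a.1 with hlt | heq | hgt
    · simp [hlt]
    · exact absurd heq hfst
    · simp [hgt, not_lt_of_gt hgt]

-- Set.add on a cons cell with a different head
theorem set_add_cons_of_ne {x y : String} (s : List String) (h : y ≠ x) :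
    PySem.Set.add (x :: s) y = x :: PySem.Set.add s y := by
  by_cases hc : y ∈ s
  · simp [PySem.Set.add, PySem.Set.contains, h, hc]
  · simp [PySem.Set.add, PySem.Set.contains, h, hc]

theorem foldl_add_cons_of_not_mem (x : String) :
    ∀ (ys : List String) (s : List String), x ∉ ys →
      ys.foldl PySem.Set.add (x :: s) = x :: ys.foldl PySem.Set.add s := by
  intro ys
  induction ys with
  | nil => intro s _; rfl
  | cons y t ih =>
    intro s h
    simp only [List.foldl_cons]
    rw [set_add_cons_of_ne s (by simp at h; exact fun e => h.1 e.symm)]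
    exact ih _ (by simp at h; exact h.2)

theorem foldl_add_of_all_contains (s : List String) :
    ∀ (ys : List String), (∀ y ∈ ys, PySem.Set.contains s y = true) →
      ys.foldl PySem.Set.add s = s := by
  intro ys
  induction ys with
  | nil => intro _; rfl
  | cons y t ih =>
    intro h
    simp only [List.foldl_cons, PySem.Set.add, h y (by simp), if_true]
    exact ih (fun z hz => h z (by simp [hz]))

-- the central fact: on a ≤-sorted list, groupRuns lists the distinct values (in first-occurrence
-- = strictly increasing order) with their multiplicities
theorem groupRuns_sorted_of_pairwise :
    ∀ l : List String, l.Pairwise (· ≤ ·) →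
      groupRuns l = (PySem.Set.ofList l).map (fun k => (k, (l.count k : Int)))
        ∧ (PySem.Set.ofList l).Pairwise (· < ·) := by
  intro l
  induction l using groupRuns.induct with
  | case1 => intro _; exact ⟨by simp [groupRuns], by simp [PySem.Set.ofList]⟩
  | case2 x t ih =>
    intro hp
    obtain ⟨hxt, ht⟩ := List.pairwise_cons.1 hp
    have hsplit : t.takeWhile (fun y => y == x) ++ t.dropWhile (fun y => y == x) = t :=
      List.takeWhile_append_dropWhile
    have hrun : ∀ y ∈ t.takeWhile (fun y => y == x), y = x := by
      intro y hy; simpa using List.mem_takeWhile_imp hy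
    have hrest_pw : (t.dropWhile (fun y => y == x)).Pairwise (· ≤ ·) :=
      List.Pairwise.sublist (List.dropWhile_sublist _) ht
    have hlt : ∀ y ∈ t.dropWhile (fun y => y == x), x < y := by
      intro y hy
      rcases hrest : t.dropWhile (fun y => y == x) with _ | ⟨hd, rs⟩
      · rw [hrest] at hy; simp at hy
      · have hne : t.dropWhile (fun y => y == x) ≠ [] := by rw [hrest]; simp
        have h1 := List.head_dropWhile_not (fun y => y == x) hne
        have h2 : (t.dropWhile (fun y => y == x)).head hne = hd := by simp [hrest]
        rw [h2] at h1
        have hhdx : x < hd := by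
          have hle : x ≤ hd := hxt hd ((List.dropWhile_sublist _).subset (by rw [hrest]; simp))
          rcases lt_or_eq_of_le hle with h' | h'
          · exact h'
          · exact absurd h'.symm (by simpa using h1)
        rw [hrest] at hy
        have hrest_pw' := hrest_pw
        rw [hrest] at hrest_pw'
        rcases List.mem_cons.1 hy with rfl | hy
        · exact hhdx
        · exact lt_of_lt_of_le hhdx ((List.pairwise_cons.1 hrest_pw').1 y hy)
    have hnotin : x ∉ t.dropWhile (fun y => y == x) := fun hm => lt_irrefl x (hlt x hm)
    obtain ⟨ih1, ih2⟩ := ih hrest_pw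
    -- Set.ofList (x :: t) = x :: Set.ofList rest
    have hof : PySem.Set.ofList (x :: t) = x :: PySem.Set.ofList (t.dropWhile (fun y => y == x)) := by
      rw [PySem.Set.ofList_eq_foldl, List.foldl_cons]
      have h0 : PySem.Set.add ([] : List String) x = [x] := by
        simp [PySem.Set.add, PySem.Set.contains]
      rw [h0]
      conv_lhs => rw [← hsplit]
      rw [List.foldl_append]
      rw [foldl_add_of_all_contains [x] (t.takeWhile (fun y => y == x)) (by
        intro y hy
        rw [hrun y hy]
        simp [PySem.Set.contains])]
      rw [foldl_add_cons_of_not_mem x _ [] hnotin, PySem.Set.ofList_eq_foldl]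
    -- counts
    have hcx : ((x :: t).count x : Int) = 1 + ((t.takeWhile (fun y => y == x)).length : Int) := by
      have h1 : t.count x = (t.takeWhile (fun y => y == x)).length := by
        conv_lhs => rw [← hsplit]
        rw [List.count_append]
        have hr : (t.takeWhile (fun y => y == x)).count x = (t.takeWhile (fun y => y == x)).length :=
          List.count_eq_length.2 (fun b hb => (hrun b hb).symm)
        have hz : (t.dropWhile (fun y => y == x)).count x = 0 := List.count_eq_zero.2 hnotin
        omega
      rw [List.count_cons_self, h1]
      omega
    have hck : ∀ k ∈ PySem.Set.ofList (t.dropWhile (fun y => y == x)),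
        (x :: t).count k = (t.dropWhile (fun y => y == x)).count k := by
      intro k hk
      have hkmem : k ∈ t.dropWhile (fun y => y == x) := (PySem.Set.mem_ofList _ _).1 hk
      have hkx : k ≠ x := fun e => lt_irrefl x (e ▸ hlt k hkmem)
      have hknotrun : k ∉ t.takeWhile (fun y => y == x) := fun hm => hkx (hrun k hm)
      have hbx : (k == x) = false := by simpa using hkx
      have hstep : (x :: t).count k
          = (x :: (t.takeWhile (fun y => y == x) ++ t.dropWhile (fun y => y == x))).count k := by
        rw [hsplit]
      rw [hstep, List.count_cons, List.count_append, List.count_eq_zero.2 hknotrun]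
      simp [hkx, Ne.symm hkx, hbx]
    constructor
    · rw [groupRuns, hof, List.map_cons]
      congr 1
      · rw [hcx]
      · rw [ih1]
        apply List.map_congr_left
        intro k hk
        rw [hck k hk]
    · rw [hof]
      apply List.pairwise_cons.2
      exact ⟨fun k hk => hlt k ((PySem.Set.mem_ofList _ _).1 hk), ih2⟩

-- the per-period values agree
theorem per_list_eq (xs : List String) :
    PySem.List.sorted2 (PySem.Dict.counter xs).items (fun p => p.1) (fun p => p.2)
      = groupRuns (PySem.List.sorted xs (fun x => x)) := by
  obtain ⟨h1, h2⟩ := groupRuns_sorted_of_pairwise (PySem.List.sorted xs (fun x => x))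
    (PySem.List.sorted_pairwise xs (fun x => x))
  have hperm : (PySem.Set.ofList (PySem.List.sorted xs (fun x => x))).Perm (PySem.Set.ofList xs) := by
    rw [List.perm_ext_iff_of_nodup (PySem.Set.nodup_ofList _) (PySem.Set.nodup_ofList _)]
    intro a
    rw [PySem.Set.mem_ofList, PySem.Set.mem_ofList, PySem.List.mem_sorted]
  have hcount : ∀ k, (PySem.List.sorted xs (fun x => x)).count k = xs.count k :=
    fun k => (PySem.List.sorted_perm xs (fun x => x) false).count_eq k
  rw [h1, PySem.Dict.items_counter]
  rw [sorted2_eq_sorted_fst _ (by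
    simpa [List.map_map, Function.comp_def] using PySem.Set.nodup_ofList xs)]
  rw [PySem.List.sorted_eq_of_perm_of_pairwise_lt
    ((PySem.Set.ofList xs).map (fun k => (k, (xs.count k : Int))))
    ((PySem.Set.ofList (PySem.List.sorted xs (fun x => x))).map (fun k => (k, (xs.count k : Int))))
    (fun p => p.1) (hperm.map _)
    (h2.map _ (fun a b hab => hab))]
  apply List.map_congr_left
  intro k _
  rw [hcount]

-- ===== VERDICT (by name: the statement is the Claim_ definition above) =====
theorem aggregate_matches_spec : Claim_equal_aggregate_matches := by
  intro phrase_dict sort_phrases _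
  unfold Spec_aggregate_matches aggregate_matches aggregate_matches_alt
  congr 1
  apply PySem.List.foldl_congr_mem
  intro acc kv _
  simp only [per_list_eq]
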